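-- pv_equiv track=rewrite | github.com/IIC2115/Syllabus-2020-1 | Laboratorios/L03/pauta.py | verificar_p3b
-- ===== SOURCE A (Python) =====
-- class Predio():
--
--     def __init__(self, retazos, caminos):
--         self.V = retazos
--         self.graph = None
--
--         self.graph = []
--         for i in range(retazos):
--             l = [0]*retazos
--             self.graph.append(l)
--
--         for i in range(len(caminos)):
--             ori = caminos[i][0]
--             dest = caminos[i][1]
--             self.graph[ori][dest] = 1
--             self.graph[dest][ori] = 1
--
--     def isSafe(self, v, arr, c):
--         for i in range(self.V):
--             if self.graph[v][i] == 1 and arr[i] == c: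
--                 return False
--         return True
--
--     def graphArrendatarioUtil(self, m, arr, v):
--         if v == self.V:
--             return True
--
--         for c in range(1, m+1):
--             if self.isSafe(v, arr, c) == True:
--                 arr[v] = c
--                 if self.graphArrendatarioUtil(m, arr, v+1) == True:
--                     return True
--                 arr[v] = 0
--
--     def graphArrendatario(self, m):
--         arr = [0] * self.V
--         if self.graphArrendatarioUtil(m, arr, 0) == None:
--             return (False, None)
--
--         return (True, arr)
--
-- def minimos_arrendatarios(retazos, caminos):
--     new_caminos = []
--     for c in caminos:
--         new_caminos.append((c[0]-1,c[1]-1))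
--     g = Predio(retazos, new_caminos)
--     for nColors in range(1,retazos+1):
--         ver = g.graphArrendatario(nColors)
--         if g.graphArrendatario(nColors)[0]:
--             arr = ver[1]
--             max_arr = max(arr)
--             resp = [[] for _ in range(max_arr)]
--             for i, t in enumerate(arr):
--                 resp[t-1].append(i+1)
--             return resp
--
-- def verificar_p3b(resp, inputs):
--     correcta = minimos_arrendatarios(*inputs)
--     n_arrendatarios = len(correcta)
--
--     ver = 0
--     for c in inputs[1]:
--         for t in resp:
--             if c[0] in t and c[1] in t:
--                 ver += 1
--                 break
--
--     if len(resp) == n_arrendatarios and ver == 0: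
--         return 1
--     else:
--         return 0
-- ===== SOURCE B (Python) =====
-- def verificar_p3b(resp, inputs):
--     retazos, caminos = inputs
--
--     # adjacency list: neighbour sets over 0-based parcel ids
--     adj = [set() for _ in range(retazos)]
--     for a, b in caminos:
--         adj[a - 1].add(b - 1)
--         adj[b - 1].add(a - 1)
--
--     # decision test: can the parcels be split among k tenants?
--     def colorable(col, v, k):
--         if v == retazos:
--             return True
--         for c in range(k, 0, -1):
--             if all(col[u] != c for u in adj[v]):
--                 nc = list(col)
--                 nc[v] = c
--                 if colorable(nc, v + 1, k):
--                     return True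
--         return False
--
--     # binary search for the least feasible number of tenants
--     lo, hi = 1, retazos
--     while lo < hi:
--         mid = (lo + hi) // 2
--         if colorable([0] * retazos, 0, mid):
--             hi = mid
--         else:
--             lo = mid + 1
--
--     conflict = any(any(a in t and b in t for t in resp) for a, b in caminos)
--     return 1 if len(resp) == lo and not conflict else 0
-- ===== Notes on version B (the rewrite author's own statement) =====
-- stated objective: alternative
-- what changed: B finds the least feasible tenant count by binary search on k over a pure boolean colourability test (neighbour sets, copied colour arrays, colours tried in descending order) instead of A's linear scan k=1..V of a mutating backtracker over a V×V 0/1 matrix followed by bucket reconstruction and max(); the conflict count becomes a single any() test; Pre_ excludes only inputs where A raises (retazos<1 or an edge label outside [1-retazos, retazos]).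
import Mathlib
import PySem

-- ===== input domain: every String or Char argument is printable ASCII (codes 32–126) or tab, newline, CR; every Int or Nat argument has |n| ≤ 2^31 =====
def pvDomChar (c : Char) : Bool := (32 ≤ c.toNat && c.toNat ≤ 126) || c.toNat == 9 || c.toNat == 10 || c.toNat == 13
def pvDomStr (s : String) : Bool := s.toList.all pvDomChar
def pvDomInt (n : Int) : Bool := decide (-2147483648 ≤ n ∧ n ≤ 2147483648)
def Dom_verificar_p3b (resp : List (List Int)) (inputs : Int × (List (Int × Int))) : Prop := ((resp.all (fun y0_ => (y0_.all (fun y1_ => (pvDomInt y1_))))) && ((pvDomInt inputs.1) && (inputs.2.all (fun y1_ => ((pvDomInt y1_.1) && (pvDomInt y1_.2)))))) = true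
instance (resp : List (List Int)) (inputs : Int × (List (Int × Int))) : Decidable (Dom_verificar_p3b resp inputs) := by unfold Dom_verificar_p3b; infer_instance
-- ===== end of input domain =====

-- B replaces A's linear scan k = 1..V of a mutating matrix backtracker plus bucket
-- reconstruction by a binary search on k over a pure boolean colourability test on
-- neighbour sets (objective: alternative).

-- Python negative-index access/assignment wraps: index i into a list of length V means (i mod V);
-- exact for -V ≤ i < V, which Pre_ guarantees for every index the programs form.
def pvNorm (V : Nat) (x : Int) : Nat := (PySem.Int.mod x (V : Int)).toNat

-- ===== PORT A =====
-- Predio.__init__: V×V zero matrix, then graph[ori][dest] = graph[dest][ori] = 1 per camino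
def pvBuildGraphA (V : Nat) (caminos : List (Int × Int)) : List (List Int) :=
  let g0 : List (List Int) := (List.range V).foldl (fun g _ => g ++ [List.replicate V (0 : Int)]) []
  caminos.foldl (fun g c =>
    let ori := pvNorm V c.1
    let dest := pvNorm V c.2
    let g1 := g.set ori ((g.getD ori []).set dest 1)
    g1.set dest ((g1.getD dest []).set ori 1)) g0

-- Predio.isSafe: scan all i in range(V); the early `return False` is Bool `all`
def pvIsSafeA (graph : List (List Int)) (V : Nat) (v : Nat) (arr : List Int) (c : Int) : Bool :=
  (List.range V).all (fun i => !(((graph.getD v []).getD i 0 == 1) && (arr.getD i 0 == c)))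

-- Predio.graphArrendatarioUtil; rem = V - v. The Python loop sets arr[v] = c, recurses, and on
-- failure resets arr[v] = 0, which restores arr exactly (arr[v] = 0 on entry), so it is findSome?.
def pvUtilA (graph : List (List Int)) (V : Nat) (m : Int) : Nat → Nat → List Int → Option (List Int)
  | 0, _, arr => some arr
  | rem + 1, v, arr =>
    (PySem.List.pyRange 1 (m + 1) 1).findSome? fun c =>
      if pvIsSafeA graph V v arr c then pvUtilA graph V m rem (v + 1) (arr.set v c) else none

-- Predio.graphArrendatario
def pvGraphArrA (graph : List (List Int)) (V : Nat) (m : Int) : Bool × Option (List Int) :=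
  match pvUtilA graph V m V 0 (List.replicate V 0) with
  | none => (false, none)
  | some arr => (true, some arr)

-- minimos_arrendatarios' buckets: resp = [[] for _ in range(max(arr))]; resp[t-1].append(i+1)
def pvBuildRespA (arr : List Int) : List (List Int) :=
  let maxArr := (PySem.List.max? arr (fun x => x)).getD 0
  let resp0 : List (List Int) := (List.range maxArr.toNat).map (fun _ => ([] : List Int))
  (PySem.List.enumerate arr 0).foldl (fun resp p =>
    resp.set (p.2 - 1).toNat ((resp.getD (p.2 - 1).toNat []) ++ [p.1 + 1])) resp0

-- minimos_arrendatarios (none where the Python returns None)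
def pvMinimosA (retazos : Int) (caminos : List (Int × Int)) : Option (List (List Int)) :=
  let newCaminos := caminos.map (fun c => (c.1 - 1, c.2 - 1))
  let V := retazos.toNat
  let graph := pvBuildGraphA V newCaminos
  (PySem.List.pyRange 1 (retazos + 1) 1).findSome? fun nColors =>
    let ver := pvGraphArrA graph V nColors
    if (pvGraphArrA graph V nColors).1 then some (pvBuildRespA (ver.2.getD []))
    else none

def verificar_p3b (resp : List (List Int)) (inputs : Int × (List (Int × Int))) : Int :=
  -- len(correcta) raises TypeError when minimos returns None (retazos ≤ 0); excluded by Pre_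
  let correcta := (pvMinimosA inputs.1 inputs.2).getD []
  let n : Int := correcta.length
  let ver : Int := inputs.2.foldl (fun acc c =>
    if resp.any (fun t => t.contains c.1 && t.contains c.2) then acc + 1 else acc) 0
  if (resp.length : Int) = n ∧ ver = 0 then 1 else 0

-- ===== PORT B =====
-- adj = [set() for _ in range(retazos)]; adj[a-1].add(b-1); adj[b-1].add(a-1)
-- (the set at the wrapped list position gains the RAW 0-based id, exactly as Python stores it)
def pvBuildAdjB (V : Nat) (caminos : List (Int × Int)) : List (PySem.Set Int) :=
  let adj0 : List (PySem.Set Int) := (List.range V).map (fun _ => (PySem.Set.empty : PySem.Set Int))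
  caminos.foldl (fun adj c =>
    let i1 := pvNorm V (c.1 - 1)
    let i2 := pvNorm V (c.2 - 1)
    let adj1 := adj.set i1 (PySem.Set.add (adj.getD i1 PySem.Set.empty) (c.2 - 1))
    adj1.set i2 (PySem.Set.add (adj1.getD i2 PySem.Set.empty) (c.1 - 1))) adj0

-- all(col[u] != c for u in adj[v]); col[u] wraps like Python's negative indexing
def pvSafeB (adj : List (PySem.Set Int)) (col : List Int) (v : Nat) (c : Int) : Bool :=
  (adj.getD v PySem.Set.empty).all (fun u => !(PySem.List.pyGetD col u 0 == c))

-- colorable(col, v, k): rem = retazos - v; nc = list(col); nc[v] = c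
def pvColB (adj : List (PySem.Set Int)) (k : Int) : Nat → Nat → List Int → Bool
  | 0, _, _ => true
  | rem + 1, v, col =>
    (PySem.List.pyRange k 0 (-1)).any (fun c =>
      if pvSafeB adj col v c then pvColB adj k rem (v + 1) (col.set v c) else false)

-- midpoint bounds cited by pvBisectB's decreasing_by
theorem pvMidBounds (lo hi : Int) (h : lo < hi) :
    lo ≤ PySem.Int.floordiv (lo + hi) 2 ∧ PySem.Int.floordiv (lo + hi) 2 < hi := by
  refine ⟨(PySem.Int.floordiv_two_mid_bounds (le_of_lt h)).1, ?_⟩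
  rw [PySem.Int.floordiv_lt_iff_lt_mul (by norm_num)]
  omega

-- while lo < hi: mid = (lo + hi) // 2; colorable → hi = mid, else lo = mid + 1
def pvBisectB (ok : Int → Bool) (lo hi : Int) : Int :=
  if h : lo < hi then
    if ok (PySem.Int.floordiv (lo + hi) 2) then pvBisectB ok lo (PySem.Int.floordiv (lo + hi) 2)
    else pvBisectB ok (PySem.Int.floordiv (lo + hi) 2 + 1) hi
  else lo
termination_by (hi - lo).toNat
decreasing_by
  · have := pvMidBounds lo hi h; omega
  · have := pvMidBounds lo hi h; omega

def verificar_p3b_alt (resp : List (List Int)) (inputs : Int × (List (Int × Int))) : Int :=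
  let retazos := inputs.1
  let caminos := inputs.2
  let V := retazos.toNat
  let adj := pvBuildAdjB V caminos
  let n := pvBisectB (fun k => pvColB adj k V 0 (List.replicate V 0)) 1 retazos
  let conflict := caminos.any (fun c => resp.any (fun t => t.contains c.1 && t.contains c.2))
  if (resp.length : Int) = n ∧ conflict = false then 1 else 0

-- ===== PRECONDITION & SPEC =====
-- Pre_ is exactly where the Python A returns: retazos ≥ 1 (otherwise len(None): TypeError) and every
-- camino endpoint a with -retazos ≤ a-1 < retazos (otherwise graph[a-1]: IndexError).
def Pre_verificar_p3b (resp : List (List Int)) (inputs : Int × (List (Int × Int))) : Prop :=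
  1 ≤ inputs.1 ∧ ∀ c ∈ inputs.2,
    (1 - inputs.1 ≤ c.1 ∧ c.1 ≤ inputs.1) ∧ (1 - inputs.1 ≤ c.2 ∧ c.2 ≤ inputs.1)
instance (resp : List (List Int)) (inputs : Int × (List (Int × Int))) : Decidable (Pre_verificar_p3b resp inputs) := by unfold Pre_verificar_p3b; infer_instance

def pvWitness_verificar_p3b : List (List Int) × (Int × (List (Int × Int))) := ([[1], [2]], (2, [(1, 2)]))

def Spec_verificar_p3b (resp : List (List Int)) (inputs : Int × (List (Int × Int))) (out : Int) : Prop := out = verificar_p3b_alt resp inputs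
instance (resp : List (List Int)) (inputs : Int × (List (Int × Int))) (out : Int) : Decidable (Spec_verificar_p3b resp inputs out) := by unfold Spec_verificar_p3b; infer_instance

-- ===== CLAIM (what is proved, stated in full; the proofs are below) =====
def Claim_equal_verificar_p3b : Prop := ∀ (resp : List (List Int)) (inputs : Int × (List (Int × Int))), Dom_verificar_p3b resp inputs → Pre_verificar_p3b resp inputs → Spec_verificar_p3b resp inputs (verificar_p3b resp inputs)

-- ===== LEMMAS AND PROOFS =====

theorem pv_foldl_range_append (n : Nat) (r : List Int) (init : List (List Int)) :
    (List.range n).foldl (fun g _ => g ++ [r]) init = init ++ List.replicate n r := by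
  induction n generalizing init with
  | zero => simp
  | succ k ih => rw [List.range_succ, List.foldl_append]; simp [ih, List.replicate_succ']

theorem pvNorm_lt (V : Nat) (hV : 0 < V) (x : Int) : pvNorm V x < V := by
  have h1 := PySem.Int.mod_lt x (b := (V : Int)) (by exact_mod_cast hV)
  have h2 := PySem.Int.mod_nonneg x (b := (V : Int)) (by exact_mod_cast hV)
  unfold pvNorm; omega

theorem pv_getD_set {α : Type} (l : List α) (n m : Nat) (v d : α) (h : n < l.length) :
    (l.set n v).getD m d = if m = n then v else l.getD m d := by
  simp only [List.getD, List.getElem?_set]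
  split
  · rename_i hnm
    subst hnm
    simp [h]
  · rename_i hnm
    split
    · rename_i hmn; exact absurd hmn.symm hnm
    · rfl

-- pyGetD on an in-range raw id reads the wrapped position
theorem pv_pyGetD_norm (col : List Int) (V : Nat) (hlen : col.length = V) (u : Int)
    (h1 : -(V : Int) ≤ u) (h2 : u < V) :
    PySem.List.pyGetD col u 0 = col.getD (pvNorm V u) 0 := by
  have hV : 0 < V := by omega
  unfold pvNorm
  rw [PySem.Int.mod_eq_emod_of_pos (by exact_mod_cast hV)]
  rcases le_or_gt 0 u with h0 | h0
  · have h3 : u % (V : Int) = u := Int.emod_eq_of_lt h0 h2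
    rw [PySem.List.pyGetD_eq_getElem col 0 h0 (by rw [hlen]; exact_mod_cast h2), h3,
      List.getD_eq_getElem col 0 (by omega)]
  · have h3 : u % (V : Int) = u + V := by
      conv_lhs => rw [show u = (u + (V:Int)) + (V:Int) * (-1) by ring]
      rw [Int.add_mul_emod_self_left]
      exact Int.emod_eq_of_lt (by omega) (by omega)
    have hk : u = -(((-u).toNat : Nat) : Int) := by omega
    rw [hk, PySem.List.pyGetD_neg_natCast col ((-u).toNat) 0 (by omega) (by omega)]
    rw [← hk, h3, List.getD_eq_getElem col 0 (by omega)]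
    congr 1
    omega

-- correspondence invariant between A's matrix and B's raw-id neighbour sets
def pvInv (V : Nat) (g : List (List Int)) (adj : List (PySem.Set Int)) : Prop :=
  g.length = V ∧ adj.length = V ∧ (∀ v : Nat, v < V → (g.getD v []).length = V) ∧
  (∀ v i : Nat, v < V → i < V →
    (((g.getD v []).getD i 0 = 1) ↔ (∃ u ∈ adj.getD v PySem.Set.empty, pvNorm V u = i))) ∧
  (∀ v : Nat, v < V → ∀ u ∈ adj.getD v PySem.Set.empty, -(V : Int) ≤ u ∧ u < (V : Int))

theorem pvInv_init (V : Nat) :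
    pvInv V ((List.range V).foldl (fun g _ => g ++ [List.replicate V (0 : Int)]) [])
      ((List.range V).map (fun _ => (PySem.Set.empty : PySem.Set Int))) := by
  rw [pv_foldl_range_append, List.nil_append]
  have hmap : (List.range V).map (fun _ => (PySem.Set.empty : PySem.Set Int)) =
      List.replicate V (PySem.Set.empty : PySem.Set Int) := by
    rw [List.map_const']; simp
  rw [hmap]
  refine ⟨by simp, by simp, ?_, ?_, ?_⟩
  · intro v hv; rw [List.getD_replicate _ hv]; simp
  · intro v i hv hi
    rw [List.getD_replicate _ hv, List.getD_replicate _ hv]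
    constructor
    · intro h; rw [List.getD_replicate _ hi] at h; exact absurd h (by norm_num)
    · rintro ⟨u, hu, -⟩; simp [PySem.Set.empty] at hu
  · intro v hv u hu
    rw [List.getD_replicate _ hv] at hu
    simp [PySem.Set.empty] at hu

theorem pvInv_step (V : Nat) (g : List (List Int)) (adj : List (PySem.Set Int))
    (hinv : pvInv V g adj) (a b : Int)
    (hab : -(V:Int) ≤ a ∧ a < V ∧ -(V:Int) ≤ b ∧ b < V) :
    pvInv V
      ((g.set (pvNorm V a) ((g.getD (pvNorm V a) []).set (pvNorm V b) 1)).set (pvNorm V b)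
        (((g.set (pvNorm V a) ((g.getD (pvNorm V a) []).set (pvNorm V b) 1)).getD (pvNorm V b) []).set (pvNorm V a) 1))
      ((adj.set (pvNorm V a) (PySem.Set.add (adj.getD (pvNorm V a) PySem.Set.empty) b)).set (pvNorm V b)
        (PySem.Set.add
          ((adj.set (pvNorm V a) (PySem.Set.add (adj.getD (pvNorm V a) PySem.Set.empty) b)).getD (pvNorm V b)
            PySem.Set.empty) a)) := by
  obtain ⟨hg, ha, hrow, hiff, hbnd⟩ := hinv
  have hV : 0 < V := by omega
  set ori := pvNorm V a with hori
  set dest := pvNorm V b with hdest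
  have ho : ori < V := pvNorm_lt V hV a
  have hd : dest < V := pvNorm_lt V hV b
  have hgo : ori < g.length := by omega
  have hao : ori < adj.length := by omega
  have hg1 : ∀ v : Nat, (g.set ori ((g.getD ori []).set dest 1)).getD v [] =
      if v = ori then (g.getD ori []).set dest 1 else g.getD v [] :=
    fun v => pv_getD_set g ori v _ [] hgo
  have ha1 : ∀ v : Nat, (adj.set ori (PySem.Set.add (adj.getD ori PySem.Set.empty) b)).getD v PySem.Set.empty =
      if v = ori then PySem.Set.add (adj.getD ori PySem.Set.empty) b else adj.getD v PySem.Set.empty :=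
    fun v => pv_getD_set adj ori v _ PySem.Set.empty hao
  have hg2 : ∀ v : Nat, ((g.set ori ((g.getD ori []).set dest 1)).set dest
      (((g.set ori ((g.getD ori []).set dest 1)).getD dest []).set ori 1)).getD v [] =
      if v = dest then ((g.set ori ((g.getD ori []).set dest 1)).getD dest []).set ori 1
      else (g.set ori ((g.getD ori []).set dest 1)).getD v [] :=
    fun v => pv_getD_set _ dest v _ [] (by rw [List.length_set]; omega)
  have ha2 : ∀ v : Nat, ((adj.set ori (PySem.Set.add (adj.getD ori PySem.Set.empty) b)).set dest
      (PySem.Set.add ((adj.set ori (PySem.Set.add (adj.getD ori PySem.Set.empty) b)).getD dest PySem.Set.empty) a)).getD v PySem.Set.empty =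
      if v = dest then PySem.Set.add ((adj.set ori (PySem.Set.add (adj.getD ori PySem.Set.empty) b)).getD dest PySem.Set.empty) a
      else (adj.set ori (PySem.Set.add (adj.getD ori PySem.Set.empty) b)).getD v PySem.Set.empty :=
    fun v => pv_getD_set _ dest v _ PySem.Set.empty (by rw [List.length_set]; omega)
  have hrow1 : ∀ v : Nat, v < V → ((g.set ori ((g.getD ori []).set dest 1)).getD v []).length = V := by
    intro v hv; rw [hg1]
    split
    · rw [List.length_set]; exact hrow ori ho
    · exact hrow v hv
  have hEntry1 : ∀ v i : Nat, ((g.set ori ((g.getD ori []).set dest 1)).getD v []).getD i 0 =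
      if v = ori ∧ i = dest then 1 else (g.getD v []).getD i 0 := by
    intro v i
    rw [hg1]
    by_cases hvo : v = ori
    · rw [if_pos hvo, pv_getD_set _ dest i _ 0 (by rw [hrow ori ho]; omega)]
      by_cases hid : i = dest <;> simp [hid, hvo]
    · rw [if_neg hvo]; simp [hvo]
  have hEntry2 : ∀ v i : Nat, (((g.set ori ((g.getD ori []).set dest 1)).set dest
      (((g.set ori ((g.getD ori []).set dest 1)).getD dest []).set ori 1)).getD v []).getD i 0 =
      if v = dest ∧ i = ori then 1 else if v = ori ∧ i = dest then 1 else (g.getD v []).getD i 0 := by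
    intro v i
    rw [hg2]
    by_cases hvd : v = dest
    · rw [if_pos hvd, pv_getD_set _ ori i _ 0 (by rw [hrow1 dest hd]; omega), hEntry1]
      by_cases hio : i = ori <;> simp [hio, hvd]
    · rw [if_neg hvd, hEntry1]
      simp [hvd]
  have hMem1 : ∀ (v : Nat) (u : Int),
      (u ∈ (adj.set ori (PySem.Set.add (adj.getD ori PySem.Set.empty) b)).getD v PySem.Set.empty) ↔
        ((v = ori ∧ u = b) ∨ u ∈ adj.getD v PySem.Set.empty) := by
    intro v u
    rw [ha1]
    by_cases hvo : v = ori
    · rw [if_pos hvo, PySem.Set.mem_add]; subst hvo; tauto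
    · rw [if_neg hvo]; tauto
  have hMem2 : ∀ (v : Nat) (u : Int),
      (u ∈ ((adj.set ori (PySem.Set.add (adj.getD ori PySem.Set.empty) b)).set dest
        (PySem.Set.add ((adj.set ori (PySem.Set.add (adj.getD ori PySem.Set.empty) b)).getD dest PySem.Set.empty) a)).getD v PySem.Set.empty) ↔
        ((v = dest ∧ u = a) ∨ (v = ori ∧ u = b) ∨ u ∈ adj.getD v PySem.Set.empty) := by
    intro v u
    rw [ha2]
    by_cases hvd : v = dest
    · rw [if_pos hvd, PySem.Set.mem_add, hMem1]; subst hvd; tauto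
    · rw [if_neg hvd, hMem1]; tauto
  refine ⟨by simp [List.length_set, hg], by simp [List.length_set, ha], ?_, ?_, ?_⟩
  · intro v hv; rw [hg2]
    split
    · rw [List.length_set]; exact hrow1 dest hd
    · exact hrow1 v hv
  · intro v i hv hi
    rw [hEntry2]
    constructor
    · intro h
      split_ifs at h with h1 h2
      · exact ⟨a, (hMem2 v a).2 (Or.inl ⟨h1.1, rfl⟩), by rw [← hori, h1.2]⟩
      · exact ⟨b, (hMem2 v b).2 (Or.inr (Or.inl ⟨h2.1, rfl⟩)), by rw [← hdest, h2.2]⟩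
      · obtain ⟨u, hu, hnu⟩ := (hiff v i hv hi).1 h
        exact ⟨u, (hMem2 v u).2 (Or.inr (Or.inr hu)), hnu⟩
    · rintro ⟨u, hu, hnu⟩
      rcases (hMem2 v u).1 hu with ⟨hv', hu'⟩ | ⟨hv', hu'⟩ | hold
      · subst hu'
        rw [← hnu, ← hori]
        split_ifs with h1 h2
        · rfl
        · rfl
        · exact absurd ⟨hv', rfl⟩ h1
      · subst hu'
        rw [← hnu, ← hdest]
        split_ifs with h1 h2
        · rfl
        · rfl
        · exact absurd ⟨hv', rfl⟩ h2
      · have hold1 := (hiff v i hv hi).2 ⟨u, hold, hnu⟩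
        split_ifs with h1 h2
        · rfl
        · rfl
        · exact hold1
  · intro v hv u hu
    rcases (hMem2 v u).1 hu with ⟨-, hu'⟩ | ⟨-, hu'⟩ | h
    · subst hu'; omega
    · subst hu'; omega
    · exact hbnd v hv u h

theorem pvInv_build (V : Nat) (hV : 0 < V) (caminos : List (Int × Int))
    (hc : ∀ c ∈ caminos, -(V:Int) ≤ c.1 - 1 ∧ c.1 - 1 < V ∧ -(V:Int) ≤ c.2 - 1 ∧ c.2 - 1 < V) :
    pvInv V (pvBuildGraphA V (caminos.map (fun c => (c.1 - 1, c.2 - 1)))) (pvBuildAdjB V caminos) := by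
  unfold pvBuildGraphA pvBuildAdjB
  rw [List.foldl_map]
  have h0 := pvInv_init V
  generalize ((List.range V).foldl (fun g _ => g ++ [List.replicate V (0 : Int)]) []) = g0 at *
  generalize ((List.range V).map (fun _ => (PySem.Set.empty : PySem.Set Int))) = adj0 at *
  induction caminos generalizing g0 adj0 with
  | nil => exact h0
  | cons c cs ih =>
    simp only [List.foldl_cons]
    exact ih (fun x hx => hc x (by simp [hx])) _ _
      (pvInv_step V g0 adj0 h0 (c.1 - 1) (c.2 - 1)
        (by have := hc c (by simp); exact ⟨this.1, this.2.1, this.2.2.1, this.2.2.2⟩))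

-- A's full-row safety scan equals B's neighbour-set check on the same colour array
theorem pvSafe_eq (V : Nat) (g : List (List Int)) (adj : List (PySem.Set Int))
    (hinv : pvInv V g adj) (col : List Int) (hlen : col.length = V) (v : Nat) (hv : v < V)
    (c : Int) :
    pvIsSafeA g V v col c = pvSafeB adj col v c := by
  obtain ⟨hg, ha, hrow, hiff, hbnd⟩ := hinv
  rw [Bool.eq_iff_iff]
  simp only [pvIsSafeA, pvSafeB, List.all_eq_true, List.mem_range, Bool.not_eq_eq_eq_not,
    Bool.not_true, Bool.and_eq_false_imp, beq_iff_eq, beq_eq_false_iff_ne, ne_eq]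
  constructor
  · intro h u hu
    obtain ⟨hub1, hub2⟩ := hbnd v hv u hu
    rw [pv_pyGetD_norm col V hlen u hub1 hub2]
    exact h (pvNorm V u) (pvNorm_lt V (by omega) u) ((hiff v (pvNorm V u) hv (pvNorm_lt V (by omega) u)).2 ⟨u, hu, rfl⟩)
  · intro h i hiV hedge
    obtain ⟨u, hu, hnu⟩ := (hiff v i hv hiV).1 hedge
    obtain ⟨hub1, hub2⟩ := hbnd v hv u hu
    have := h u hu
    rw [pv_pyGetD_norm col V hlen u hub1 hub2, hnu] at this
    exact this

-- stepwise-safe colour chains: the common characterisation of both searches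
def pvChain (adj : List (PySem.Set Int)) : List Int → Nat → List Int → Prop
  | [], _, _ => True
  | c :: cs, v, col => pvSafeB adj col v c = true ∧ 1 ≤ c ∧ pvChain adj cs (v + 1) (col.set v c)

-- writing a chain into the array (used to read off A's found colouring)
def pvWrite : List Int → Nat → List Int → List Int
  | col, _, [] => col
  | col, v, c :: cs => pvWrite (col.set v c) (v + 1) cs

theorem pvWrite_eq (cs : List Int) (col : List Int) (v : Nat) (h : v + cs.length = col.length) :
    pvWrite col v cs = col.take v ++ cs := by
  induction cs generalizing col v with
  | nil =>
    simp only [pvWrite, List.append_nil]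
    rw [List.take_of_length_le (by simp at h; omega)]
  | cons c cs ih =>
    simp only [pvWrite]
    rw [ih _ _ (by simp only [List.length_set]; simp at h; omega)]
    rw [List.take_add_one, List.take_set_of_le (le_refl v)]
    simp [show v < col.length by simp at h; omega]

-- A's backtracker succeeds exactly on states from which a chain with colours ≤ m exists,
-- and its result is that chain written into the array
theorem pvUtilA_some (g : List (List Int)) (V : Nat) (adj : List (PySem.Set Int))
    (hinv : pvInv V g adj) (m : Int) : ∀ (rem v : Nat) (col : List Int),
    col.length = V → v + rem = V → ∀ (arr : List Int),
    pvUtilA g V m rem v col = some arr →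
    ∃ cs, cs.length = rem ∧ (∀ c ∈ cs, c ≤ m) ∧ pvChain adj cs v col ∧ arr = pvWrite col v cs := by
  intro rem
  induction rem with
  | zero =>
    intro v col hlen hv arr h
    simp only [pvUtilA, Option.some.injEq] at h
    exact ⟨[], rfl, by simp, trivial, h.symm⟩
  | succ r ih =>
    intro v col hlen hv arr h
    simp only [pvUtilA] at h
    obtain ⟨c, hcmem, hc⟩ := List.exists_of_findSome?_eq_some h
    obtain ⟨hc1, hc2⟩ := PySem.List.mem_pyRange_one.1 hcmem
    split at hc
    · rename_i hsafe
      obtain ⟨cs, hl, hle, hch, harr⟩ := ih (v + 1) (col.set v c) (by simp [hlen]) (by omega) arr hc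
      refine ⟨c :: cs, by simp [hl], ?_, ?_, harr⟩
      · intro x hx
        rcases List.mem_cons.1 hx with h' | h'
        · omega
        · exact hle x h'
      · exact ⟨by rw [← pvSafe_eq V g adj hinv col hlen v (by omega)]; exact hsafe, hc1, hch⟩
    · exact absurd hc (by simp)

theorem pvUtilA_complete (g : List (List Int)) (V : Nat) (adj : List (PySem.Set Int))
    (hinv : pvInv V g adj) (m : Int) : ∀ (cs : List Int) (v : Nat) (col : List Int),
    col.length = V → v + cs.length = V →
    (∀ c ∈ cs, c ≤ m) → pvChain adj cs v col →
    (pvUtilA g V m cs.length v col).isSome := by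
  intro cs
  induction cs with
  | nil => intro v col hlen hv hle hch; simp [pvUtilA]
  | cons c cs ih =>
    intro v col hlen hv hle hch
    obtain ⟨hsafe, hc1, hch'⟩ := hch
    simp only [pvUtilA, List.length_cons]
    rw [Option.isSome_iff_ne_none]
    intro hnone
    rw [List.findSome?_eq_none_iff] at hnone
    have hcmem : c ∈ PySem.List.pyRange 1 (m + 1) 1 :=
      PySem.List.mem_pyRange_one.2 ⟨hc1, by have := hle c (by simp); omega⟩
    have := hnone c hcmem
    rw [pvSafe_eq V g adj hinv col hlen v (by simp at hv; omega)] at this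
    rw [if_pos hsafe] at this
    have hrec := ih (v + 1) (col.set v c) (by simp [hlen]) (by simp at hv ⊢; omega)
      (fun x hx => hle x (by simp [hx])) hch'
    rw [this] at hrec
    simp at hrec

-- B's test succeeds exactly on the same states (colours tried downward changes nothing)
theorem pvColB_iff (adj : List (PySem.Set Int)) (k : Int) : ∀ (rem v : Nat) (col : List Int),
    pvColB adj k rem v col = true ↔
      ∃ cs, cs.length = rem ∧ (∀ c ∈ cs, c ≤ k) ∧ pvChain adj cs v col := by
  intro rem
  induction rem with
  | zero =>
    intro v col
    simp only [pvColB, true_iff]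
    exact ⟨[], rfl, by simp, trivial⟩
  | succ r ih =>
    intro v col
    simp only [pvColB, List.any_eq_true]
    constructor
    · rintro ⟨c, hcmem, hc⟩
      obtain ⟨hc0, hck⟩ := PySem.List.mem_pyRange_neg_one.1 hcmem
      split at hc
      · rename_i hsafe
        obtain ⟨cs, hl, hle, hch⟩ := (ih (v + 1) (col.set v c)).1 hc
        refine ⟨c :: cs, by simp [hl], ?_, hsafe, by omega, hch⟩
        intro x hx
        rcases List.mem_cons.1 hx with h' | h'
        · omega
        · exact hle x h'
      · exact absurd hc (by simp)
    · rintro ⟨cs, hl, hle, hch⟩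
      match cs, hl with
      | c :: cs, hl =>
        obtain ⟨hsafe, hc1, hch'⟩ := hch
        refine ⟨c, PySem.List.mem_pyRange_neg_one.2 ⟨by omega, by have := hle c (by simp); omega⟩, ?_⟩
        rw [if_pos hsafe]
        exact (ih (v + 1) (col.set v c)).2 ⟨cs, by simp at hl; omega, fun x hx => hle x (by simp [hx]), hch'⟩

-- the all-distinct colouring 1..V is a chain, so V tenants always suffice
-- the partially filled all-distinct colouring
def pvColv (V v : Nat) : List Int :=
  (List.range v).map (fun i : Nat => ((i : Int) + 1)) ++ List.replicate (V - v) 0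

theorem pvColv_len (V v : Nat) (h : v ≤ V) : (pvColv V v).length = V := by
  simp [pvColv]; omega

theorem pvColv_getD (V v j : Nat) (hj : j < V) (hv : v ≤ V) :
    (pvColv V v).getD j 0 = if j < v then ((j : Int) + 1) else 0 := by
  unfold pvColv
  by_cases h : j < v
  · rw [if_pos h, List.getD_append _ _ _ _ (by simpa using h)]
    simp [h]
  · rw [if_neg h, List.getD_append_right _ _ _ j (by simp; omega)]
    simp only [List.length_map, List.length_range]
    rw [List.getD_replicate _ (by omega)]

theorem pvColv_set (V v : Nat) (h : v < V) :
    (pvColv V v).set v ((v : Int) + 1) = pvColv V (v + 1) := by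
  unfold pvColv
  have hrep : List.replicate (V - v) (0 : Int) = 0 :: List.replicate (V - (v + 1)) 0 := by
    rw [show V - v = (V - (v + 1)) + 1 by omega, List.replicate_succ]
  rw [hrep, List.set_append_right _ _ (by simp)]
  simp only [List.length_map, List.length_range, Nat.sub_self, List.set_cons_zero]
  rw [List.range_succ, List.map_append]
  simp

theorem pvChain_distinct_aux (V : Nat) (adj : List (PySem.Set Int))
    (hbnd : ∀ v : Nat, v < V → ∀ u ∈ adj.getD v PySem.Set.empty, -(V : Int) ≤ u ∧ u < (V : Int)) :
    ∀ (w v : Nat), v + w = V →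
      pvChain adj ((List.range' (v + 1) w).map (fun i : Nat => (i : Int))) v (pvColv V v) := by
  intro w
  induction w with
  | zero => intro v hv; simp [List.range']; trivial
  | succ r ih =>
    intro v hv
    rw [List.range'_succ, List.map_cons]
    refine ⟨?_, by push_cast; omega, ?_⟩
    · simp only [pvSafeB, List.all_eq_true]
      intro u hu
      obtain ⟨hub1, hub2⟩ := hbnd v (by omega) u hu
      rw [pv_pyGetD_norm _ V (pvColv_len V v (by omega)) u hub1 hub2]
      rw [pvColv_getD V v (pvNorm V u) (pvNorm_lt V (by omega) u) (by omega)]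
      split
      · rename_i hlt
        simp only [Bool.not_eq_eq_eq_not, Bool.not_true, beq_eq_false_iff_ne, ne_eq]
        intro hc
        have : pvNorm V u = v := by exact_mod_cast (by omega : ((pvNorm V u : Nat) : Int) = (v : Nat))
        omega
      · simp only [Bool.not_eq_eq_eq_not, Bool.not_true, beq_eq_false_iff_ne, ne_eq]
        intro hc
        have : ((v : Int) + 1) = 0 := by omega
        omega
    · have hset : (pvColv V v).set v (((v : Nat) : Int) + 1) = pvColv V (v + 1) :=
        pvColv_set V v (by omega)
      have hcast : (((v + 1 : Nat) : Nat) : Int) = ((v : Nat) : Int) + 1 := by push_cast; ring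
      rw [hcast, hset]
      exact ih (v + 1) (by omega)

theorem pvChain_distinct (V : Nat) (adj : List (PySem.Set Int))
    (hbnd : ∀ v : Nat, v < V → ∀ u ∈ adj.getD v PySem.Set.empty, -(V : Int) ≤ u ∧ u < (V : Int)) :
    ∃ cs : List Int, cs.length = V ∧ (∀ c ∈ cs, c ≤ (V : Int)) ∧
      pvChain adj cs 0 (List.replicate V 0) := by
  refine ⟨(List.range' 1 V).map (fun i : Nat => (i : Int)), by simp, ?_, ?_⟩
  · intro c hc
    obtain ⟨i, hi, rfl⟩ := List.mem_map.1 hc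
    rw [List.mem_range'] at hi
    exact_mod_cast by omega
  · have := pvChain_distinct_aux V adj hbnd V 0 (by omega)
    simpa [pvColv] using this

-- findSome? over 1..n returns the value at the FIRST succeeding index
theorem pv_findSome?_first {β : Type} (f : Int → Option β) (y : β) :
    ∀ (n : Nat) (a b : Int), (b - a).toNat ≤ n →
    (PySem.List.pyRange a b 1).findSome? f = some y →
    ∃ k, a ≤ k ∧ k < b ∧ f k = some y ∧ ∀ j, a ≤ j → j < k → f j = none := by
  intro n
  induction n with
  | zero =>
    intro a b hn h
    rw [PySem.List.pyRange_one_eq_nil (by omega)] at h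
    simp at h
  | succ n ih =>
    intro a b hn h
    by_cases hab : a < b
    · rw [PySem.List.pyRange_one_cons hab, List.findSome?_cons] at h
      cases hfa : f a with
      | some z =>
        rw [hfa] at h
        exact ⟨a, le_refl a, hab, by simp at h; rw [hfa, h], fun j hj1 hj2 => by omega⟩
      | none =>
        rw [hfa] at h; simp only at h
        obtain ⟨k, hk1, hk2, hk3, hk4⟩ := ih (a+1) b (by omega) h
        exact ⟨k, by omega, hk2, hk3, fun j hj1 hj2 => by
          by_cases hja : j = a
          · rw [hja]; exact hfa
          · exact hk4 j (by omega) hj2⟩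
    · rw [PySem.List.pyRange_one_eq_nil (by omega)] at h
      simp at h

-- binary search returns the threshold of a monotone predicate
theorem pvBisect_aux (ok : Int → Bool) (m : Int)
    (h1 : ∀ k, m ≤ k → ok k = true) (h2 : ∀ k, k < m → ok k = false) :
    ∀ (n : Nat) (lo hi : Int), (hi - lo).toNat ≤ n → lo ≤ m → m ≤ hi → pvBisectB ok lo hi = m := by
  intro n
  induction n with
  | zero =>
    intro lo hi hn hlo hhi
    rw [pvBisectB, dif_neg (by omega)]
    omega
  | succ n ih =>
    intro lo hi hn hlo hhi
    rw [pvBisectB]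
    by_cases hlt : lo < hi
    · rw [dif_pos hlt]
      have hmid := pvMidBounds lo hi hlt
      by_cases hok : ok (PySem.Int.floordiv (lo + hi) 2) = true
      · rw [if_pos hok]
        have hm : m ≤ PySem.Int.floordiv (lo + hi) 2 := by
          by_contra hc
          rw [h2 _ (by omega)] at hok; exact absurd hok (by simp)
        exact ih lo _ (by omega) hlo hm
      · rw [if_neg hok]
        have hm : PySem.Int.floordiv (lo + hi) 2 + 1 ≤ m := by
          by_contra hc
          rw [h1 _ (by omega)] at hok; exact absurd rfl hok
        exact ih _ hi (by omega) hm hhi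
    · rw [dif_neg hlt]; omega

theorem pvBisect_eq (ok : Int → Bool) (m lo hi : Int)
    (h1 : ∀ k, m ≤ k → ok k = true) (h2 : ∀ k, k < m → ok k = false)
    (hlo : lo ≤ m) (hhi : m ≤ hi) : pvBisectB ok lo hi = m :=
  pvBisect_aux ok m h1 h2 (hi - lo).toNat lo hi (le_refl _) hlo hhi

-- the bucket list has length max(arr)
theorem pvBuildResp_length (arr : List Int) :
    (pvBuildRespA arr).length = ((PySem.List.max? arr (fun x => x)).getD 0).toNat := by
  have key : ∀ (l : List (Int × Int)) (init : List (List Int)),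
      (l.foldl (fun resp p => resp.set (p.2 - 1).toNat ((resp.getD (p.2 - 1).toNat []) ++ [p.1 + 1])) init).length = init.length := by
    intro l
    induction l with
    | nil => intro init; rfl
    | cons x xs ih => intro init; rw [List.foldl_cons, ih, List.length_set]
  unfold pvBuildRespA
  rw [key]
  simp

-- A's conflict counter is zero iff B's any-conflict flag is false
theorem pv_ver_eq (caminos : List (Int × Int)) (p : Int × Int → Bool) :
    (caminos.foldl (fun acc c => if p c then acc + 1 else acc) (0 : Int) = 0) ↔
      (caminos.any p = false) := by
  rw [PySem.List.foldl_count_if, zero_add, Nat.cast_eq_zero, List.countP_eq_zero,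
    List.any_eq_false]

theorem pvChain_pos (adj : List (PySem.Set Int)) :
    ∀ (cs : List Int) (v : Nat) (col : List Int), pvChain adj cs v col → ∀ c ∈ cs, 1 ≤ c := by
  intro cs
  induction cs with
  | nil => intro v col _ c hc; simp at hc
  | cons c0 cs ih =>
    intro v col hch c hc
    obtain ⟨-, h1, hch'⟩ := hch
    rcases List.mem_cons.1 hc with h' | h'
    · omega
    · exact ih (v + 1) _ hch' c h'

-- ===== VERDICT (by name: the statement is the Claim_ definition above) =====
theorem verificar_p3b_spec : Claim_equal_verificar_p3b := by
  intro resp inputs _ hpre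
  obtain ⟨retazos, caminos⟩ := inputs
  obtain ⟨hret, hcam⟩ := hpre
  unfold Spec_verificar_p3b verificar_p3b verificar_p3b_alt
  simp only []
  set V := retazos.toNat with hVdef
  have hV : 0 < V := by omega
  have hVI : ((V : Nat) : Int) = retazos := by omega
  have hc' : ∀ c ∈ caminos,
      -((V : Nat) : Int) ≤ c.1 - 1 ∧ c.1 - 1 < V ∧ -((V : Nat) : Int) ≤ c.2 - 1 ∧ c.2 - 1 < V := by
    intro c hc
    have := hcam c hc
    rw [hVI]
    omega
  have hinv := pvInv_build V hV caminos hc'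
  set g := pvBuildGraphA V (caminos.map (fun c => (c.1 - 1, c.2 - 1))) with hgdef
  set adj := pvBuildAdjB V caminos with hadjdef
  set ok : Int → Bool := fun k => pvColB adj k V 0 (List.replicate V 0) with hokdef
  have hlen0 : (List.replicate V (0 : Int)).length = V := by simp
  -- both searches succeed exactly when a stepwise-safe chain exists
  have hEx : ∀ m : Int, (pvUtilA g V m V 0 (List.replicate V 0)).isSome = true ↔
      ∃ cs : List Int, cs.length = V ∧ (∀ c ∈ cs, c ≤ m) ∧
        pvChain adj cs 0 (List.replicate V 0) := by
    intro m
    constructor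
    · intro h
      obtain ⟨arr, harr⟩ := Option.isSome_iff_exists.1 h
      obtain ⟨cs, h1, h2, h3, -⟩ := pvUtilA_some g V adj hinv m V 0 _ hlen0 (by omega) arr harr
      exact ⟨cs, h1, h2, h3⟩
    · rintro ⟨cs, h1, h2, h3⟩
      have := pvUtilA_complete g V adj hinv m cs 0 _ hlen0 (by omega) h2 h3
      rwa [h1] at this
  have hOk : ∀ m : Int, ok m = true ↔
      ∃ cs : List Int, cs.length = V ∧ (∀ c ∈ cs, c ≤ m) ∧
        pvChain adj cs 0 (List.replicate V 0) := fun m => pvColB_iff adj m V 0 _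
  have hBridge : ∀ m : Int, (pvUtilA g V m V 0 (List.replicate V 0)).isSome = ok m := by
    intro m
    rw [Bool.eq_iff_iff, hEx m, ← hOk m]
  -- V tenants always suffice
  have hokV : ok retazos = true := by
    obtain ⟨cs, h1, h2, h3⟩ := pvChain_distinct V adj hinv.2.2.2.2
    exact (hOk retazos).2 ⟨cs, h1, by rw [← hVI]; exact h2, h3⟩
  set f : Int → Option (List (List Int)) := fun nColors =>
    let ver := pvGraphArrA g V nColors
    if (pvGraphArrA g V nColors).1 then some (pvBuildRespA (ver.2.getD [])) else none with hfdef
  have hGA : ∀ m : Int, (pvGraphArrA g V m).1 = (pvUtilA g V m V 0 (List.replicate V 0)).isSome := by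
    intro m
    unfold pvGraphArrA
    cases pvUtilA g V m V 0 (List.replicate V 0) <;> rfl
  have hfV : f retazos ≠ none := by
    rw [hfdef]
    simp only [hGA, hBridge, hokV, if_pos]
    simp
  have hfind : ∃ y, (PySem.List.pyRange 1 (retazos + 1) 1).findSome? f = some y := by
    cases hfs : (PySem.List.pyRange 1 (retazos + 1) 1).findSome? f with
    | none =>
      rw [List.findSome?_eq_none_iff] at hfs
      exact absurd (hfs retazos (PySem.List.mem_pyRange_one.2 ⟨by omega, by omega⟩)) hfV
    | some y => exact ⟨y, rfl⟩
  obtain ⟨y, hy⟩ := hfind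
  obtain ⟨k0, hk1, hk2, hk3, hk4⟩ := pv_findSome?_first f y (retazos + 1 - 1).toNat 1 (retazos + 1) (le_refl _) hy
  have hmin : pvMinimosA retazos caminos = some y := by
    unfold pvMinimosA
    exact hy
  -- the colouring A finds at the first feasible k0
  have hu0 : ∃ arr, pvUtilA g V k0 V 0 (List.replicate V 0) = some arr := by
    rcases hu : pvUtilA g V k0 V 0 (List.replicate V 0) with _ | arr
    · rw [hfdef] at hk3
      simp only [hGA, hu] at hk3
      simp at hk3
    · exact ⟨arr, rfl⟩
  obtain ⟨arr, harr⟩ := hu0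
  have hyval : y = pvBuildRespA arr := by
    rw [hfdef] at hk3
    simp only [pvGraphArrA, harr] at hk3
    simp at hk3
    exact hk3.symm
  obtain ⟨cs, hcs1, hcs2, hcs3, hcs4⟩ := pvUtilA_some g V adj hinv k0 V 0 _ hlen0 (by omega) arr harr
  have harrcs : arr = cs := by
    rw [hcs4, pvWrite_eq cs _ 0 (by simp [hcs1])]
    simp
  have hpos : ∀ c ∈ arr, 1 ≤ c := by
    rw [harrcs]; exact pvChain_pos adj cs 0 _ hcs3
  have hmx : ∃ mx, PySem.List.max? arr (fun x => x) = some mx := by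
    cases hm : PySem.List.max? arr (fun x => x) with
    | none =>
      rw [PySem.List.max?_eq_none_iff] at hm
      rw [hm] at harrcs
      simp [← harrcs] at hcs1
      omega
    | some mx => exact ⟨mx, rfl⟩
  obtain ⟨mx, hmxeq⟩ := hmx
  have hmxmem : mx ∈ arr := PySem.List.max?_mem hmxeq
  have hmx1 : 1 ≤ mx := hpos mx hmxmem
  have hmxk0 : mx ≤ k0 := by rw [harrcs] at hmxmem; exact hcs2 mx hmxmem
  have hokmx : ok mx = true := by
    refine (hOk mx).2 ⟨cs, hcs1, ?_, hcs3⟩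
    intro c hc
    have := PySem.List.max?_isMax hmxeq c (by rw [harrcs]; exact hc)
    exact this
  have hk0mx : k0 ≤ mx := by
    by_contra hcon
    have hfmx : f mx = none := hk4 mx (by omega) (by omega)
    rw [hfdef] at hfmx
    simp only [hGA, hBridge, hokmx, if_pos] at hfmx
    simp at hfmx
  have hmxk0' : mx = k0 := by omega
  -- binary search returns the same threshold k0
  have h1 : ∀ k, k0 ≤ k → ok k = true := by
    intro k hk
    obtain ⟨cs', a1, a2, a3⟩ := (hOk k0).1 (by rw [← hmxk0']; exact hokmx)
    exact (hOk k).2 ⟨cs', a1, fun c hc => le_trans (a2 c hc) hk, a3⟩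
  have h2 : ∀ k, k < k0 → ok k = false := by
    intro k hk
    by_contra hcon
    have hcon' : ok k = true := by
      cases hx : ok k
      · exact absurd hx hcon
      · rfl
    obtain ⟨cs', a1, a2, a3⟩ := (hOk k).1 hcon'
    rcases hcs' : cs' with _ | ⟨c0, rest⟩
    · rw [hcs'] at a1; simp at a1; omega
    · rw [hcs'] at a2 a3
      have hc01 : 1 ≤ c0 := a3.2.1
      have hc0k : c0 ≤ k := a2 c0 (by simp)
      by_cases hk1' : 1 ≤ k
      · have : (pvUtilA g V k V 0 (List.replicate V 0)).isSome = true := by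
          rw [hBridge]; exact hcon'
        have hfk : f k = none := hk4 k (by omega) hk
        rw [hfdef] at hfk
        simp only [hGA, this, if_pos] at hfk
        simp at hfk
      · omega
  have hbis : pvBisectB ok 1 retazos = k0 :=
    pvBisect_eq ok k0 1 retazos h1 h2 (by omega) (by omega)
  -- assemble: lengths agree and the conflict tests agree
  rw [hmin, hbis]
  simp only [Option.getD_some]
  have hlenY : ((y.length : Nat) : Int) = k0 := by
    rw [hyval, pvBuildResp_length, hmxeq]
    simp only [Option.getD_some]
    omega
  refine if_congr ?_ rfl rfl
  rw [hlenY]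
  constructor
  · rintro ⟨hA, hB⟩
    exact ⟨hA, (pv_ver_eq caminos _).1 hB⟩
  · rintro ⟨hA, hB⟩
    exact ⟨hA, (pv_ver_eq caminos _).2 hB⟩
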